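-- pv_equiv track=rewrite | github.com/phj128/Robotics_Intensive_Training | message/send_debug.py | filter_infos
-- ===== SOURCE A (Python) =====
-- def filter_infos(infos, robot_id, color):
--     infos_ = infos.copy()
--     for i in range(len(infos)):
--         if infos[i][3] == robot_id:
--             if infos[i][2] == color:
--                 infos_.pop(i)
--                 break
--     return infos_
-- ===== SOURCE B (Python) =====
-- def filter_infos(infos, robot_id, color):
--     result = []
--     removed = False
--     for x in infos:
--         if not removed and x[3] == robot_id and x[2] == color:
--             removed = True
--             continue
--         result.append(x)
--     return result
-- ===== Notes on version B (the rewrite author's own statement) =====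
-- stated objective: simpler
-- what changed: B builds the result in a single pass with a removed flag instead of copying the whole list and popping an index; no copy, no index bookkeeping, no pop.
import Mathlib
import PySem

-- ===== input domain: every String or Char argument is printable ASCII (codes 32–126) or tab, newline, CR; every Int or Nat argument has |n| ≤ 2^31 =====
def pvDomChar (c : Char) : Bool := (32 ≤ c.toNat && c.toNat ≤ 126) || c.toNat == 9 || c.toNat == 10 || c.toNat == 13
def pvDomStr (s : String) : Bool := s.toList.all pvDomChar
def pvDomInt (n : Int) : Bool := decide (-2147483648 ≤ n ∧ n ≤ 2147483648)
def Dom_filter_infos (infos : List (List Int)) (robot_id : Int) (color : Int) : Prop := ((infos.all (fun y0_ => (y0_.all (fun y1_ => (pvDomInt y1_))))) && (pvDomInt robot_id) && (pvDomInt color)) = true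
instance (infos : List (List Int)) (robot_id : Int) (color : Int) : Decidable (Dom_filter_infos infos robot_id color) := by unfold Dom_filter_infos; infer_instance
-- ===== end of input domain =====

-- B removes the first matching row while building the result in one pass with a removed flag,
-- instead of A's copy-the-list-then-pop-an-index; same O(n) cost, simpler. (No mutation is
-- observable through the return-value equivalence proved here; A does not mutate its argument.)

-- ===== PORT A =====
-- Loop over i in range(len(infos)); acc is the copy infos_. Row indexing infos[i][3]/[2] is
-- ported with getD (default 0): the default is unreachable inside Pre_, which excludes exactly
-- the inputs where Python raises IndexError on a short row.
def filterGoA (robot_id color : Int) (infos acc : List (List Int)) (i : Nat) : List (List Int) :=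
  if i < infos.length then
    let row := infos.getD i []
    if row.getD 3 0 = robot_id then
      if row.getD 2 0 = color then
        match PySem.List.pop? acc (i : Int) with    -- infos_.pop(i), then break
        | some r => r.2
        | none => acc                               -- unreachable under Pre_ (IndexError in Python)
      else filterGoA robot_id color infos acc (i + 1)
    else filterGoA robot_id color infos acc (i + 1)
  else acc
termination_by infos.length - i

def filter_infos (infos : List (List Int)) (robot_id : Int) (color : Int) : List (List Int) :=
  filterGoA robot_id color infos infos 0

-- ===== PORT B =====
-- Single pass with a removed flag: skip the first row with x[3]==robot_id and x[2]==color,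
-- append every other row. x[3]/x[2] ported with getD 0 (unreachable default under Pre_).
def filterGoB (robot_id color : Int) (removed : Bool) : List (List Int) → List (List Int)
  | [] => []
  | x :: xs =>
    if !removed && x.getD 3 0 == robot_id && x.getD 2 0 == color then
      filterGoB robot_id color true xs
    else
      x :: filterGoB robot_id color removed xs

def filter_infos_alt (infos : List (List Int)) (robot_id : Int) (color : Int) : List (List Int) :=
  filterGoB robot_id color false infos

-- ===== PRECONDITION & SPEC =====
def pvRowMatch (robot_id color : Int) (row : List Int) : Bool :=
  4 ≤ row.length && row.getD 3 0 == robot_id && row.getD 2 0 == color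

-- Pre_ excludes exactly the inputs on which A raises IndexError: a row shorter than 4 entries
-- that A's scan reaches, i.e. one at a position not preceded by any matching row.
def Pre_filter_infos (infos : List (List Int)) (robot_id : Int) (color : Int) : Prop :=
  ∀ i < infos.length,
    (∀ j < i, ¬ pvRowMatch robot_id color (infos.getD j []) = true) →
      4 ≤ (infos.getD i []).length
instance (infos : List (List Int)) (robot_id : Int) (color : Int) : Decidable (Pre_filter_infos infos robot_id color) := by unfold Pre_filter_infos; infer_instance

def pvWitness_filter_infos : List (List Int) × Int × Int := ([[0, 0, 3, 4], [1, 1, 3, 5]], 4, 3)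

def Spec_filter_infos (infos : List (List Int)) (robot_id : Int) (color : Int) (out : List (List Int)) : Prop := out = filter_infos_alt infos robot_id color
instance (infos : List (List Int)) (robot_id : Int) (color : Int) (out : List (List Int)) : Decidable (Spec_filter_infos infos robot_id color out) := by unfold Spec_filter_infos; infer_instance

-- ===== CLAIM (what is proved, stated in full; the proofs are below) =====
def Claim_equal_filter_infos : Prop := ∀ (infos : List (List Int)) (robot_id : Int) (color : Int), Dom_filter_infos infos robot_id color → Pre_filter_infos infos robot_id color → Spec_filter_infos infos robot_id color (filter_infos infos robot_id color)

-- ===== LEMMAS AND PROOFS =====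

-- once removed, B copies the remainder unchanged
theorem filterGoB_true (robot_id color : Int) (xs : List (List Int)) :
    filterGoB robot_id color true xs = xs := by
  induction xs with
  | nil => rfl
  | cons x xs ih => simp [filterGoB, ih]


theorem filterGoB_cons (robot_id color : Int) (removed : Bool) (x : List Int) (xs : List (List Int)) :
    filterGoB robot_id color removed (x :: xs) =
      if !removed && x.getD 3 0 == robot_id && x.getD 2 0 == color then
        filterGoB robot_id color true xs
      else x :: filterGoB robot_id color removed xs := rfl

theorem filterGoA_eq (robot_id color : Int) (infos : List (List Int)) :
    ∀ k i, infos.length - i ≤ k →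
      filterGoA robot_id color infos infos i =
        infos.take i ++ filterGoB robot_id color false (infos.drop i) := by
  intro k
  induction k with
  | zero =>
    intro i hle
    have hge : infos.length ≤ i := by omega
    rw [filterGoA]
    simp [Nat.not_lt.mpr hge, List.drop_eq_nil_of_le hge, filterGoB,
      List.take_of_length_le hge]
  | succ k ih =>
    intro i hle
    by_cases hi : i < infos.length
    · have hdrop : infos.drop i = infos[i] :: infos.drop (i + 1) :=
        List.drop_eq_getElem_cons hi
      have hgetD : infos.getD i [] = infos[i] := List.getD_eq_getElem infos [] hi
      have htake : infos.take (i + 1) = infos.take i ++ [infos[i]] := by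
        rw [List.take_add_one]
        simp [List.getElem?_eq_getElem hi]
      rw [filterGoA]
      simp only [hi, if_pos, hgetD]
      by_cases h3 : (infos[i] : List Int).getD 3 0 = robot_id
      · by_cases h2 : (infos[i] : List Int).getD 2 0 = color
        · rw [if_pos h3, if_pos h2, PySem.List.pop?_natCast infos i hi, hdrop,
            filterGoB_cons,
            if_pos (by
              simp only [Bool.not_false, Bool.true_and, Bool.and_eq_true, beq_iff_eq]
              exact ⟨h3, h2⟩ :
              (!false && (infos[i].getD 3 0 == robot_id) && (infos[i].getD 2 0 == color)) = true),
            filterGoB_true, List.eraseIdx_eq_take_drop_succ]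
        · rw [if_pos h3, if_neg h2, ih (i + 1) (by omega), hdrop, filterGoB_cons,
            if_neg (by
              simp only [Bool.not_false, Bool.true_and, Bool.and_eq_true, beq_iff_eq]
              exact fun h => h2 h.2 :
              ¬ (!false && (infos[i].getD 3 0 == robot_id) && (infos[i].getD 2 0 == color)) = true),
            htake, List.append_assoc, List.singleton_append]
      · rw [if_neg h3, ih (i + 1) (by omega), hdrop, filterGoB_cons,
          if_neg (by
            simp only [Bool.not_false, Bool.true_and, Bool.and_eq_true, beq_iff_eq]
            exact fun h => h3 h.1 :
            ¬ (!false && (infos[i].getD 3 0 == robot_id) && (infos[i].getD 2 0 == color)) = true),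
          htake, List.append_assoc, List.singleton_append]
    · have hge : infos.length ≤ i := by omega
      rw [filterGoA]
      simp [Nat.not_lt.mpr hge, List.drop_eq_nil_of_le hge, filterGoB,
        List.take_of_length_le hge]

-- ===== VERDICT (by name: the statement is the Claim_ definition above) =====
theorem filter_infos_spec : Claim_equal_filter_infos := by
  intro infos robot_id color _ _
  unfold Spec_filter_infos filter_infos filter_infos_alt
  simpa using filterGoA_eq robot_id color infos infos.length 0 (by omega)
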